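-- pv_equiv track=rewrite | github.com/ManishChatla/Sprint-Planning | sprint_planning_agent/agent/planner.py | plan_sprint
-- ===== SOURCE A (Python) =====
-- def plan_sprint(stories, team):
--     assignments = {member["name"]: [] for member in team["members"]}
--     member_cycle = list(assignments.keys())
--     idx = 0
--     for story in stories:
--         assignee = member_cycle[idx % len(member_cycle)]
--         assignments[assignee].append(story)
--         idx += 1
--     return assignments
-- ===== SOURCE B (Python) =====
-- def plan_sprint(stories, team):
--     names = list(dict.fromkeys(m["name"] for m in team["members"]))
--     n = len(names)
--     return {name: stories[i::n] for i, name in enumerate(names)}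
-- ===== Notes on version B (the rewrite author's own statement) =====
-- stated objective: simpler
-- what changed: Instead of one pass over stories with a cycling modulo counter appending into per-member buckets, B enumerates the (deduplicated) member names once and gives member i the strided slice stories[i::n].
import Mathlib
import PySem

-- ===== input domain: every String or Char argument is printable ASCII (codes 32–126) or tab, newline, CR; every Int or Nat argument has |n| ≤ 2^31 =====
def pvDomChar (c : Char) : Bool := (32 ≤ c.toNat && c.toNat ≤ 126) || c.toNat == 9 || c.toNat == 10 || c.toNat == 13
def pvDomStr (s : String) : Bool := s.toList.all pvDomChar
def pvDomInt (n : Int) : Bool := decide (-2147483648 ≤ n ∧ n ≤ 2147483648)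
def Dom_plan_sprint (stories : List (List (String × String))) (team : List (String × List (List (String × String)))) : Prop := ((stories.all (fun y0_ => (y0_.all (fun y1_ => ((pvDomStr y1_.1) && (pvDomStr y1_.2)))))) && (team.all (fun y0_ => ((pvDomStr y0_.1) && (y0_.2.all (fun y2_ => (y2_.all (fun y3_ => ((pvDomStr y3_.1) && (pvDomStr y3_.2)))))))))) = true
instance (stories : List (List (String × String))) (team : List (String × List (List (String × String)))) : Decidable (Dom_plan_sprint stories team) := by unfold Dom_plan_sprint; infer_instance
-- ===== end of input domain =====

-- B builds each member's list with a strided slice stories[i::n] over the deduplicated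
-- member names instead of A's single pass over stories with a cycling modulo counter
-- (objective: simpler — a dict comprehension instead of a counter loop).

-- ===== PORT A =====
def plan_sprint (stories : List (List (String × String))) (team : List (String × List (List (String × String)))) : List (String × List (List (String × String))) :=
  let assignments : PySem.Dict String (List (List (String × String))) :=
    (((PySem.Dict.mk team).get? "members").getD []).foldl
      (fun d member => d.insert (((PySem.Dict.mk member).get? "name").getD "") []) PySem.Dict.empty
  let member_cycle := assignments.keys
  let final := stories.foldl
    (fun (st : PySem.Dict String (List (List (String × String))) × Int) story =>
      let assignee := (PySem.List.pyGet? member_cycle (PySem.Int.mod st.2 (member_cycle.length : Int))).getD ""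
      (st.1.modify assignee [] (fun l => l ++ [story]), st.2 + 1))
    (assignments, 0)
  final.1.items

-- ===== PORT B =====
def plan_sprint_alt (stories : List (List (String × String))) (team : List (String × List (List (String × String)))) : List (String × List (List (String × String))) :=
  let names := PySem.List.dedup ((((PySem.Dict.mk team).get? "members").getD []).map
      (fun m => ((PySem.Dict.mk m).get? "name").getD ""))
  let n : Int := names.length
  (PySem.List.enumerate names).map (fun p => (p.2, (PySem.List.slice? stories (some p.1) none n).getD []))

-- ===== PRECONDITION & SPEC =====
-- Pre_ excludes exactly the inputs where the Python A raises: a team without a "members"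
-- key (KeyError), a member without a "name" key (KeyError), and an empty member list with
-- non-empty stories (ZeroDivisionError from idx % 0).
def Pre_plan_sprint (stories : List (List (String × String))) (team : List (String × List (List (String × String)))) : Prop :=
  (((PySem.Dict.mk team).get? "members").isSome = true)
  ∧ (∀ m ∈ ((PySem.Dict.mk team).get? "members").getD [], (((PySem.Dict.mk m).get? "name").isSome = true))
  ∧ (((PySem.Dict.mk team).get? "members").getD [] ≠ [] ∨ stories = [])
instance (stories : List (List (String × String))) (team : List (String × List (List (String × String)))) : Decidable (Pre_plan_sprint stories team) := by unfold Pre_plan_sprint; infer_instance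
def pvWitness_plan_sprint : (List (List (String × String))) × (List (String × List (List (String × String)))) :=
  ([[("title", "s1")], [("title", "s2")], [("title", "s3")]],
   [("members", [[("name", "alice")], [("name", "bob")]])])

def Spec_plan_sprint (stories : List (List (String × String))) (team : List (String × List (List (String × String)))) (out : List (String × List (List (String × String)))) : Prop := out = plan_sprint_alt stories team
instance (stories : List (List (String × String))) (team : List (String × List (List (String × String)))) (out : List (String × List (List (String × String)))) : Decidable (Spec_plan_sprint stories team out) := by unfold Spec_plan_sprint; infer_instance

-- ===== CLAIM (what is proved, stated in full; the proofs are below) =====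
def Claim_equal_plan_sprint : Prop := ∀ (stories : List (List (String × String))) (team : List (String × List (List (String × String)))), Dom_plan_sprint stories team → Pre_plan_sprint stories team → Spec_plan_sprint stories team (plan_sprint stories team)

-- ===== LEMMAS AND PROOFS =====

def strided {α : Type} : List α → Nat → Nat → List α
  | [], _, _ => []
  | x :: xs, 0, n => x :: strided xs (n - 1) n
  | _ :: xs, j + 1, n => strided xs j n

theorem filter_enumerate_eq_strided {α : Type} (n i : Nat) (hn : 0 < n) (hi : i < n)
    (xs : List α) (k : Nat) :
    ((PySem.List.enumerate xs (k : Int)).filter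
        (fun p => PySem.Int.mod p.1 (n : Int) == (i : Int))).map (fun p => p.2)
    = strided xs ((i + n - k % n) % n) n := by
  induction xs generalizing k with
  | nil => simp [PySem.List.enumerate, strided]
  | cons x xs ih =>
      have hr : k % n < n := Nat.mod_lt _ hn
      have hk1 : (k + 1) % n = (k % n + 1) % n := by rw [Nat.mod_add_mod]
      rw [PySem.List.enumerate_cons, List.filter_cons]
      have hcast : ((k : Int) + 1) = ((k + 1 : Nat) : Int) := by push_cast; ring
      by_cases hki : k % n = i
      · have hj : (i + n - k % n) % n = 0 := by
          rw [hki]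
          have : i + n - i = n := by omega
          rw [this, Nat.mod_self]
        have hpred : (PySem.Int.mod ((k : Int)) (n : Int) == (i : Int)) = true := by
          simp [PySem.Int.mod_natCast, hki]
        rw [hj]
        simp only [hpred, if_pos]
        rw [List.map_cons, hcast, ih (k + 1)]
        have hj' : (i + n - (k + 1) % n) % n = n - 1 := by
          rw [hk1, hki]
          by_cases h1 : i + 1 < n
          · rw [Nat.mod_eq_of_lt h1]
            have : i + n - (i + 1) = n - 1 := by omega
            rw [this, Nat.mod_eq_of_lt (by omega)]
          · have hin : i + 1 = n := by omega
            rw [hin, Nat.mod_self, Nat.sub_zero, Nat.add_mod_right, Nat.mod_eq_of_lt hi]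
            omega
        rw [hj']
        simp [strided]
      · have hj : (i + n - k % n) % n = i + n - k % n - (if k % n ≤ i then n else 0) := by
          by_cases h2 : k % n ≤ i
          · have : i + n - k % n = (i - k % n) + n := by omega
            rw [this, Nat.add_mod_right, Nat.mod_eq_of_lt (by omega), if_pos h2]
            omega
          · rw [Nat.mod_eq_of_lt (by omega), if_neg h2]
            omega
        have hpred : (PySem.Int.mod ((k : Int)) (n : Int) == (i : Int)) = false := by
          rw [PySem.Int.mod_natCast]
          exact beq_eq_false_iff_ne.mpr (by exact_mod_cast hki)
        simp only [hpred, Bool.false_eq_true, if_neg, not_false_iff]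
        rw [hcast, ih (k + 1)]
        have hj' : (i + n - (k + 1) % n) % n = i + n - k % n - (if k % n ≤ i then n else 0) - 1 := by
          rw [hk1]
          by_cases h1 : k % n + 1 < n
          · rw [Nat.mod_eq_of_lt h1]
            by_cases h2 : k % n + 1 ≤ i
            · have : i + n - (k % n + 1) = (i - (k % n + 1)) + n := by omega
              rw [this, Nat.add_mod_right, Nat.mod_eq_of_lt (by omega), if_pos (by omega)]
              omega
            · rw [Nat.mod_eq_of_lt (by omega)]
              split <;> omega
          · have hkn : k % n + 1 = n := by omega
            rw [hkn, Nat.mod_self, Nat.sub_zero, Nat.add_mod_right, Nat.mod_eq_of_lt hi]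
            split <;> omega
        rw [hj', hj]
        obtain ⟨j, hjj⟩ : ∃ j, i + n - k % n - (if k % n ≤ i then n else 0) = j + 1 := by
          refine ⟨i + n - k % n - (if k % n ≤ i then n else 0) - 1, ?_⟩
          split <;> omega
        rw [hjj]
        simp [strided]

-- extension: filterMap over range is stable once the function is none
theorem filterMap_range_mono {α : Type} (f : Nat → Option α) (a b : Nat) (hab : a ≤ b)
    (h : ∀ k, a ≤ k → f k = none) :
    List.filterMap f (List.range b) = List.filterMap f (List.range a) := by
  obtain ⟨c, rfl⟩ := Nat.exists_eq_add_of_le hab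
  rw [List.range_add, List.filterMap_append, List.filterMap_map]
  have hnil : ∀ k ∈ List.range c, (f ∘ (a + ·)) k = none := fun k _ => h _ (Nat.le_add_right a k)
  rw [List.filterMap_eq_nil_iff.mpr hnil, List.append_nil]

theorem filterMap_getElem_eq_strided {α : Type} (xs : List α) (i n : Nat) (hn : 0 < n) :
    List.filterMap (fun k => xs[i + n * k]?) (List.range xs.length) = strided xs i n := by
  induction xs generalizing i with
  | nil => simp [strided]
  | cons x xs ih =>
      match i with
      | 0 =>
          simp only [List.length_cons, List.range_succ_eq_map, List.filterMap_cons]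
          simp only [Nat.mul_zero, Nat.add_zero, List.getElem?_cons_zero]
          rw [List.filterMap_map]
          have hcomp : ∀ k, ((fun k => (x :: xs)[0 + n * k]?) ∘ Nat.succ) k
              = xs[(n - 1) + n * k]? := by
            intro k
            have : 0 + n * (k + 1) = ((n - 1) + n * k) + 1 := by
              cases n with
              | zero => omega
              | succ m => ring_nf; omega
            simp only [Function.comp, Nat.succ_eq_add_one, this, List.getElem?_cons_succ]
          rw [List.filterMap_congr (fun k _ => hcomp k), ih (n - 1)]
          simp [strided]
      | j + 1 =>
          simp only [List.length_cons, List.range_succ, List.filterMap_append]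
          have htop : List.filterMap (fun k => (x :: xs)[j + 1 + n * k]?) [xs.length] = [] := by
            simp only [List.filterMap_cons, List.filterMap_nil]
            rw [List.getElem?_eq_none (by simp; nlinarith)]
          rw [htop, List.append_nil]
          have hcomp : ∀ (k : Nat), (x :: xs)[j + 1 + n * k]? = xs[j + n * k]? := by
            intro k
            have : j + 1 + n * k = (j + n * k) + 1 := by omega
            rw [this, List.getElem?_cons_succ]
          rw [List.filterMap_congr (fun k _ => hcomp k), ih j]
          simp [strided]

theorem strided_eq_nil {α : Type} (xs : List α) : ∀ i n, xs.length ≤ i → strided xs i n = [] := by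
  induction xs with
  | nil => intro i n _; rfl
  | cons x xs ih =>
      intro i n h
      obtain ⟨j, rfl⟩ : ∃ j, i = j + 1 := ⟨i - 1, by simp at h; omega⟩
      exact ih j n (by simp at h; omega)

theorem slice_eq_strided {α : Type} (xs : List α) (i n : Nat) (hn : 0 < n) :
    (PySem.List.slice? xs (some (i : Int)) none (n : Int)).getD [] = strided xs i n := by
  rw [PySem.List.slice?]
  have hn0 : ¬((n : Int) = 0) := by omega
  have hnneg : ¬((n : Int) < 0) := by omega
  have hineg : ¬((i : Int) < 0) := by omega
  have hnpos : (0 : Int) < (n : Int) := by omega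
  simp only [PySem.List.sliceIndices, if_neg hn0, if_neg hnneg, if_neg hineg, if_pos hnpos,
    Option.getD_some]
  by_cases hiL : i < xs.length
  · have hmin : min (i : Int) (xs.length : Int) = (i : Int) := by omega
    have hlt : ((i : Int) < (xs.length : Int)) := by omega
    rw [hmin, if_pos hlt]
    have hf : ∀ k ∈ List.range ((((xs.length : Int) - (i : Int) + (n : Int) - 1) / (n : Int)).toNat),
        (fun x => xs[((i : Int) + (n : Int) * (x : Int)).toNat]?) k = (fun k => xs[i + n * k]?) k := by
      intro k _
      have hc : ((i : Int) + (n : Int) * (k : Int)) = ((i + n * k : Nat) : Int) := by push_cast; ring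
      simp only [hc, Int.toNat_natCast]
    rw [List.filterMap_congr hf]
    set cnt := (((xs.length : Int) - (i : Int) + (n : Int) - 1) / (n : Int)).toNat with hcnt
    have hkey : xs.length - i ≤ n * cnt := by
      have hA : (1 : Int) ≤ (xs.length : Int) - (i : Int) := by omega
      set A := (xs.length : Int) - (i : Int) with hAdef
      have h1 := Int.mul_ediv_add_emod (A + n - 1) (n : Int)
      have h2 := Int.emod_nonneg (A + n - 1) (by omega : (n : Int) ≠ 0)
      have h3 := Int.emod_lt_of_pos (A + n - 1) hnpos
      have hq : A ≤ (n : Int) * ((A + n - 1) / (n : Int)) := by omega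
      have hq0 : (0 : Int) ≤ (A + n - 1) / (n : Int) := Int.ediv_nonneg (by omega) (by omega)
      have : ((n * cnt : Nat) : Int) = (n : Int) * ((A + n - 1) / (n : Int)) := by
        push_cast [hcnt, Int.toNat_of_nonneg hq0]
        ring
      omega
    have hnone : ∀ k, min cnt xs.length ≤ k → (fun k => xs[i + n * k]?) k = none := by
      intro k hk
      apply List.getElem?_eq_none
      by_cases hc : cnt ≤ xs.length
      · have : cnt ≤ k := le_trans (by omega) hk
        have : n * cnt ≤ n * k := Nat.mul_le_mul_left n this
        omega
      · have hLk : xs.length ≤ k := le_trans (by omega) hk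
        have : k ≤ n * k := Nat.le_mul_of_pos_left k hn
        omega
    rw [filterMap_range_mono _ (min cnt xs.length) cnt (by omega) hnone,
      ← filterMap_range_mono _ (min cnt xs.length) xs.length (by omega) hnone]
    exact filterMap_getElem_eq_strided xs i n hn
  · have hmin : min (i : Int) (xs.length : Int) = (xs.length : Int) := by omega
    rw [hmin]
    have hlt : ¬((xs.length : Int) < (xs.length : Int)) := by omega
    rw [if_neg hlt]
    simp only [List.range_zero, List.filterMap_nil]
    exact (strided_eq_nil xs i n (by omega)).symm

-- the initial dict maps every key to []
theorem getD_init (members : List (List (String × String)))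
    (d : PySem.Dict String (List (List (String × String)))) (c : String)
    (hd : d.getD c [] = []) :
    (members.foldl (fun d member =>
        d.insert (((PySem.Dict.mk member).get? "name").getD "") []) d).getD c [] = [] := by
  induction members generalizing d with
  | nil => simpa using hd
  | cons m ms ih =>
      simp only [List.foldl_cons]
      exact ih _ (by rw [PySem.Dict.getD_insert]; split <;> simp [hd])

-- A's pair-state fold over stories equals a dict-only fold over enumerate
theorem foldl_pair_eq_enumerate (g : Int → String) (xs : List (List (String × String)))
    (k : Nat) (d : PySem.Dict String (List (List (String × String)))) :
    (xs.foldl (fun st story => (st.1.modify (g st.2) [] (fun l => l ++ [story]), st.2 + 1))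
        (d, (k : Int))).1
    = (PySem.List.enumerate xs (k : Int)).foldl
        (fun d p => d.modify (g p.1) [] (fun l => l ++ [p.2])) d := by
  induction xs generalizing k d with
  | nil => simp [PySem.List.enumerate]
  | cons x xs ih =>
      simp only [List.foldl_cons, PySem.List.enumerate_cons, List.foldl_cons]
      have : ((k : Int) + 1) = ((k + 1 : Nat) : Int) := by push_cast; ring
      rw [this, ih]


-- A's bucket for member cycle[i]
theorem bucket_eq_strided (cycle : List String) (hc : cycle.Nodup) (hn : 0 < cycle.length)
    (i : Nat) (hi : i < cycle.length) (stories : List (List (String × String)))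
    (d : PySem.Dict String (List (List (String × String)))) (hd : d.getD cycle[i] [] = []) :
    ((stories.foldl (fun st story =>
        ((st.1.modify ((PySem.List.pyGet? cycle (PySem.Int.mod st.2 (cycle.length : Int))).getD "")
          [] (fun l => l ++ [story])), st.2 + 1)) (d, 0)).1).getD cycle[i] []
    = strided stories i cycle.length := by
  have h0 : (0 : Int) = ((0 : Nat) : Int) := rfl
  rw [h0, foldl_pair_eq_enumerate
    (fun idx => (PySem.List.pyGet? cycle (PySem.Int.mod idx (cycle.length : Int))).getD "")
    stories 0 d]
  have hmf : ((PySem.List.enumerate stories ((0 : Nat) : Int)).foldl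
      (fun d p => d.modify
        ((PySem.List.pyGet? cycle (PySem.Int.mod p.1 (cycle.length : Int))).getD "")
        [] (fun l => l ++ [p.2])) d)
      = (((PySem.List.enumerate stories ((0 : Nat) : Int)).map
          (fun p => ((PySem.List.pyGet? cycle (PySem.Int.mod p.1 (cycle.length : Int))).getD "", p.2))).foldl
          (fun d q => d.modify q.1 [] (fun l => l ++ [q.2])) d) := by
    rw [List.foldl_map]
  rw [hmf, PySem.Dict.getD_foldl_modify_append, hd, List.nil_append, List.filter_map,
    List.map_map]
  have hcong : ∀ p ∈ PySem.List.enumerate stories ((0 : Nat) : Int),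
      ((fun q => q.1 == cycle[i]) ∘
        (fun p => ((PySem.List.pyGet? cycle (PySem.Int.mod p.1 (cycle.length : Int))).getD "", p.2))) p
      = (fun p => PySem.Int.mod p.1 (cycle.length : Int) == (i : Int)) p := by
    intro p hp
    rcases (PySem.List.mem_enumerate_iff stories _ p).1 hp with ⟨j, hj, rfl⟩
    have hz : ((0 : Nat) : Int) + (j : Int) = ((j : Nat) : Int) := by push_cast; ring
    simp only [Function.comp, hz, PySem.Int.mod_natCast, PySem.List.pyGet?_natCast]
    have hjn : j % cycle.length < cycle.length := Nat.mod_lt _ hn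
    rw [List.getElem?_eq_getElem hjn, Option.getD_some]
    by_cases hji : j % cycle.length = i
    · simp [hji]
    · have hne : cycle[j % cycle.length] ≠ cycle[i] := by
        intro hcontra
        exact hji ((hc.getElem_inj_iff).1 hcontra)
      simp only [beq_eq_false_iff_ne.mpr hne]
      exact (beq_eq_false_iff_ne.mpr (by exact_mod_cast hji)).symm
  rw [List.filter_congr hcong]
  have := filter_enumerate_eq_strided cycle.length i hn hi stories 0
  rw [show ((fun x => x.2) ∘
      (fun p => ((PySem.List.pyGet? cycle (PySem.Int.mod p.1 (cycle.length : Int))).getD "", p.2)))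
      = (fun p : Int × List (String × String) => p.2) from rfl]
  rw [this, Nat.zero_mod, Nat.sub_zero, Nat.add_mod_right, Nat.mod_eq_of_lt hi]

-- ===== VERDICT (by name: the statement is the Claim_ definition above) =====
theorem plan_eq_aux (stories : List (List (String × String)))
    (members : List (List (String × String)))
    (h3 : members ≠ [] ∨ stories = []) :
    ((stories.foldl (fun st story =>
      ((st.1.modify ((PySem.List.pyGet?
            ((members.foldl (fun d member =>
                d.insert (((PySem.Dict.mk member).get? "name").getD "") []) (PySem.Dict.empty : PySem.Dict String (List (List (String × String))))).keys)
            (PySem.Int.mod st.2 (((members.foldl (fun d member =>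
                d.insert (((PySem.Dict.mk member).get? "name").getD "") []) (PySem.Dict.empty : PySem.Dict String (List (List (String × String))))).keys).length : Int))).getD "")
          [] (fun l => l ++ [story])), st.2 + 1))
      ((members.foldl (fun d member =>
          d.insert (((PySem.Dict.mk member).get? "name").getD "") []) (PySem.Dict.empty : PySem.Dict String (List (List (String × String))))), 0)).1).items
    = (PySem.List.enumerate
        (PySem.List.dedup (members.map (fun m => ((PySem.Dict.mk m).get? "name").getD "")))).map
        (fun p => (p.2, (PySem.List.slice? stories (some p.1) none
          ((PySem.List.dedup (members.map (fun m => ((PySem.Dict.mk m).get? "name").getD ""))).length : Int)).getD [])) := by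
  rcases members with _ | ⟨m, ms⟩
  · obtain rfl : stories = [] := h3.resolve_left (by simp)
    rfl
  · have hkeys : (((m :: ms).foldl (fun d member =>
        d.insert (((PySem.Dict.mk member).get? "name").getD "") [])
        (PySem.Dict.empty : PySem.Dict String (List (List (String × String))))).keys)
        = PySem.Set.ofList ((m :: ms).map (fun m => ((PySem.Dict.mk m).get? "name").getD "")) := by
      simp only [PySem.Dict.keys_foldl_insert_key, PySem.Dict.keys_empty, PySem.Set.update_nil_left]
    rw [hkeys, PySem.List.dedup_eq_ofList]
    have hnodup : (PySem.Set.ofList ((m :: ms).map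
        (fun m => ((PySem.Dict.mk m).get? "name").getD ""))).Nodup := PySem.Set.nodup_ofList _
    have hn : 0 < (PySem.Set.ofList ((m :: ms).map
        (fun m => ((PySem.Dict.mk m).get? "name").getD ""))).length := by
      rw [List.map_cons, PySem.Set.ofList_cons]
      simp
    revert hkeys
    generalize hcyc : PySem.Set.ofList ((m :: ms).map
        (fun m => ((PySem.Dict.mk m).get? "name").getD "")) = cycle at hnodup hn
    intro hkeys
    have hd0 : ∀ c, (((m :: ms).foldl (fun d member =>
        d.insert (((PySem.Dict.mk member).get? "name").getD "") [])
        (PySem.Dict.empty : PySem.Dict String (List (List (String × String))))).getD c []) = [] :=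
      fun c => getD_init _ _ _ (PySem.Dict.getD_empty _ _)
    have hFkeys : ((stories.foldl (fun st story =>
        ((st.1.modify ((PySem.List.pyGet? cycle
            (PySem.Int.mod st.2 (cycle.length : Int))).getD "")
          [] (fun l => l ++ [story])), st.2 + 1))
        (((m :: ms).foldl (fun d member =>
            d.insert (((PySem.Dict.mk member).get? "name").getD "") [])
            (PySem.Dict.empty : PySem.Dict String (List (List (String × String))))), 0)).1).keys
        = cycle := by
      rw [show (0 : Int) = ((0 : Nat) : Int) from rfl, foldl_pair_eq_enumerate
        (fun idx => (PySem.List.pyGet? cycle (PySem.Int.mod idx (cycle.length : Int))).getD "")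
        stories 0 _]
      simp only [PySem.Dict.keys_foldl_modify_key]
      rw [hkeys, PySem.Set.update_eq_append_filter]
      have hfil : ∀ y ∈ PySem.Set.ofList ((PySem.List.enumerate stories ((0 : Nat) : Int)).map
          (fun x => (PySem.List.pyGet? cycle (PySem.Int.mod x.1 (cycle.length : Int))).getD "")),
          (!cycle.contains y) = false := by
        intro y hy
        have hy' := (PySem.Set.mem_ofList _ y).1 hy
        obtain ⟨p, hp, rfl⟩ := List.mem_map.1 hy'
        rcases PySem.List.mem_enumerate_iff stories _ p |>.1 hp with ⟨j, hj, rfl⟩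
        have hz : ((0 : Nat) : Int) + (j : Int) = ((j : Nat) : Int) := by push_cast; ring
        simp only [hz, PySem.Int.mod_natCast, PySem.List.pyGet?_natCast]
        have hjn : j % cycle.length < cycle.length := Nat.mod_lt _ hn
        rw [List.getElem?_eq_getElem hjn, Option.getD_some]
        simp only [PySem.Set.contains_eq_listContains]
        simp [List.getElem_mem hjn]
      rw [List.filter_eq_nil_iff.2 (by intro y hy; simpa using hfil y hy), List.append_nil]
    have hFnodup : ((stories.foldl (fun st story =>
        ((st.1.modify ((PySem.List.pyGet? cycle
            (PySem.Int.mod st.2 (cycle.length : Int))).getD "")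
          [] (fun l => l ++ [story])), st.2 + 1))
        (((m :: ms).foldl (fun d member =>
            d.insert (((PySem.Dict.mk member).get? "name").getD "") [])
            (PySem.Dict.empty : PySem.Dict String (List (List (String × String))))), 0)).1).keys.Nodup := by
      rw [hFkeys]; exact hnodup
    rw [PySem.Dict.items_eq_map_keys _ hFnodup [], hFkeys]
    apply List.ext_getElem
    · simp [PySem.List.length_enumerate]
    · intro t ht1 ht2
      have htc : t < cycle.length := by simpa using ht1
      rw [List.getElem_map, List.getElem_map, PySem.List.getElem_enumerate cycle 0 t
        (by rw [PySem.List.length_enumerate]; exact htc)]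
      have hbucket := bucket_eq_strided cycle hnodup hn t htc stories _ (hd0 _)
      rw [hbucket]
      have hz : (0 : Int) + (t : Int) = ((t : Nat) : Int) := by ring
      simp only [hz]
      rw [slice_eq_strided stories t cycle.length hn]

theorem plan_sprint_spec : Claim_equal_plan_sprint := by
  intro stories team _ hpre
  obtain ⟨-, -, h3⟩ := hpre
  exact plan_eq_aux stories (((PySem.Dict.mk team).get? "members").getD []) h3
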